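-- pv_equiv track=rewrite | github.com/Workwrite-Niidome/genesis | backend/app/world/voxel_engine.py | _bresenham_3d
-- ===== SOURCE A (Python) =====
-- def _bresenham_3d(
--     x0: int, y0: int, z0: int,
--     x1: int, y1: int, z1: int,
-- ) -> list[tuple[int, int, int]]:
--     """Return all integer grid cells along the line from (x0,y0,z0) to (x1,y1,z1).
--
--     Uses the 3D Bresenham line algorithm.  The start and end points are
--     included in the returned list.
--     """
--     points: list[tuple[int, int, int]] = []
--
--     dx = abs(x1 - x0)
--     dy = abs(y1 - y0)
--     dz = abs(z1 - z0)
--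
--     sx = 1 if x1 > x0 else -1
--     sy = 1 if y1 > y0 else -1
--     sz = 1 if z1 > z0 else -1
--
--     # Driving axis is the one with the largest delta
--     if dx >= dy and dx >= dz:
--         # X-dominant
--         err_y = 2 * dy - dx
--         err_z = 2 * dz - dx
--         x, y, z = x0, y0, z0
--         for _ in range(dx + 1):
--             points.append((x, y, z))
--             if err_y > 0:
--                 y += sy
--                 err_y -= 2 * dx
--             if err_z > 0:
--                 z += sz
--                 err_z -= 2 * dx
--             err_y += 2 * dy
--             err_z += 2 * dz
--             x += sx
--     elif dy >= dx and dy >= dz: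
--         # Y-dominant
--         err_x = 2 * dx - dy
--         err_z = 2 * dz - dy
--         x, y, z = x0, y0, z0
--         for _ in range(dy + 1):
--             points.append((x, y, z))
--             if err_x > 0:
--                 x += sx
--                 err_x -= 2 * dy
--             if err_z > 0:
--                 z += sz
--                 err_z -= 2 * dy
--             err_x += 2 * dx
--             err_z += 2 * dz
--             y += sy
--     else:
--         # Z-dominant
--         err_x = 2 * dx - dz
--         err_y = 2 * dy - dz
--         x, y, z = x0, y0, z0
--         for _ in range(dz + 1):
--             points.append((x, y, z))
--             if err_x > 0:
--                 x += sx
--                 err_x -= 2 * dz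
--             if err_y > 0:
--                 y += sy
--                 err_y -= 2 * dz
--             err_x += 2 * dx
--             err_y += 2 * dy
--             z += sz
--
--     return points
-- ===== SOURCE B (Python) =====
-- def _bresenham_3d(
--     x0: int, y0: int, z0: int,
--     x1: int, y1: int, z1: int,
-- ) -> list[tuple[int, int, int]]:
--     """Grid cells along the 3D line, computed per-point by a closed-form
--     integer-division count instead of per-step error accumulators."""
--     dx = abs(x1 - x0)
--     dy = abs(y1 - y0)
--     dz = abs(z1 - z0)
--     sx = 1 if x1 > x0 else -1
--     sy = 1 if y1 > y0 else -1
--     sz = 1 if z1 > z0 else -1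
--     d = max(dx, dy, dz)
--     if d == 0:
--         return [(x0, y0, z0)]
--     return [
--         (
--             x0 + sx * ((2 * dx * i + d - 1) // (2 * d)),
--             y0 + sy * ((2 * dy * i + d - 1) // (2 * d)),
--             z0 + sz * ((2 * dz * i + d - 1) // (2 * d)),
--         )
--         for i in range(d + 1)
--     ]
-- ===== Notes on version B (the rewrite author's own statement) =====
-- stated objective: simpler
-- what changed: Replaces A's three driving-axis branches with per-step error accumulators by a single branch-free list comprehension that computes every coordinate directly with a closed-form floor-division step count (2*d*i + dmax - 1) // (2*dmax), with dmax = 0 returning the single start point.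
import Mathlib
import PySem

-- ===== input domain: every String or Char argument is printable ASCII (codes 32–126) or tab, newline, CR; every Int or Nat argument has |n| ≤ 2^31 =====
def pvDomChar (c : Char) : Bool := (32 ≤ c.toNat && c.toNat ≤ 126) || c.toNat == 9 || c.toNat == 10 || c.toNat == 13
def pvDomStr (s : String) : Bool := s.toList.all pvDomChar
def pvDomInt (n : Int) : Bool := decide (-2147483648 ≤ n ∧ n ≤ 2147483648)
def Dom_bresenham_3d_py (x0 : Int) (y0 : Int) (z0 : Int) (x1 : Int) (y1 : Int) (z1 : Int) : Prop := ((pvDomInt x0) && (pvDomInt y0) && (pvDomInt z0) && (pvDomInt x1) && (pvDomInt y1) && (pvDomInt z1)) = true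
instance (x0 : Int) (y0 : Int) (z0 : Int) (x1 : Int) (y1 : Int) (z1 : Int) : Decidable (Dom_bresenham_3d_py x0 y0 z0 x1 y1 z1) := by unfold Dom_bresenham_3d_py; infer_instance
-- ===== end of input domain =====

-- B replaces A's three per-axis error-accumulator loops by one branch-free list of
-- points computed with a closed-form floor-division step count (objective: simpler).

-- ===== PORT A =====
-- X-dominant loop of A: state (x, y, z, err_y, err_z), one emit + update per step.
def pvLoopX (sx sy sz dx dy dz : Int) : Nat → Int → Int → Int → Int → Int → List (Int × Int × Int)
  | 0, _, _, _, _, _ => []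
  | n + 1, x, y, z, erry, errz =>
    (x, y, z) ::
      pvLoopX sx sy sz dx dy dz n (x + sx)
        (if erry > 0 then y + sy else y)
        (if errz > 0 then z + sz else z)
        ((if erry > 0 then erry - 2 * dx else erry) + 2 * dy)
        ((if errz > 0 then errz - 2 * dx else errz) + 2 * dz)

-- Y-dominant loop of A.
def pvLoopY (sx sy sz dx dy dz : Int) : Nat → Int → Int → Int → Int → Int → List (Int × Int × Int)
  | 0, _, _, _, _, _ => []
  | n + 1, x, y, z, errx, errz =>
    (x, y, z) ::
      pvLoopY sx sy sz dx dy dz n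
        (if errx > 0 then x + sx else x)
        (y + sy)
        (if errz > 0 then z + sz else z)
        ((if errx > 0 then errx - 2 * dy else errx) + 2 * dx)
        ((if errz > 0 then errz - 2 * dy else errz) + 2 * dz)

-- Z-dominant loop of A.
def pvLoopZ (sx sy sz dx dy dz : Int) : Nat → Int → Int → Int → Int → Int → List (Int × Int × Int)
  | 0, _, _, _, _, _ => []
  | n + 1, x, y, z, errx, erry =>
    (x, y, z) ::
      pvLoopZ sx sy sz dx dy dz n
        (if errx > 0 then x + sx else x)
        (if erry > 0 then y + sy else y)
        (z + sz)
        ((if errx > 0 then errx - 2 * dz else errx) + 2 * dx)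
        ((if erry > 0 then erry - 2 * dz else erry) + 2 * dy)

def bresenham_3d_py (x0 : Int) (y0 : Int) (z0 : Int) (x1 : Int) (y1 : Int) (z1 : Int) : List (Int × Int × Int) :=
  let dx := |x1 - x0|
  let dy := |y1 - y0|
  let dz := |z1 - z0|
  let sx : Int := if x1 > x0 then 1 else -1
  let sy : Int := if y1 > y0 then 1 else -1
  let sz : Int := if z1 > z0 then 1 else -1
  if dx ≥ dy ∧ dx ≥ dz then
    pvLoopX sx sy sz dx dy dz (dx + 1).toNat x0 y0 z0 (2 * dy - dx) (2 * dz - dx)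
  else if dy ≥ dx ∧ dy ≥ dz then
    pvLoopY sx sy sz dx dy dz (dy + 1).toNat x0 y0 z0 (2 * dx - dy) (2 * dz - dy)
  else
    pvLoopZ sx sy sz dx dy dz (dz + 1).toNat x0 y0 z0 (2 * dx - dz) (2 * dy - dz)

-- ===== PORT B =====
-- B's closed-form step count: (2*dd*i + d - 1) // (2*d)  (Python floor division).
def pvCount (dd d i : Int) : Int := PySem.Int.floordiv (2 * dd * i + d - 1) (2 * d)

def bresenham_3d_py_alt (x0 : Int) (y0 : Int) (z0 : Int) (x1 : Int) (y1 : Int) (z1 : Int) : List (Int × Int × Int) :=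
  let dx := |x1 - x0|
  let dy := |y1 - y0|
  let dz := |z1 - z0|
  let sx : Int := if x1 > x0 then 1 else -1
  let sy : Int := if y1 > y0 then 1 else -1
  let sz : Int := if z1 > z0 then 1 else -1
  let d := max dx (max dy dz)
  if d = 0 then [(x0, y0, z0)]
  else
    (List.range (d + 1).toNat).map fun i : Nat =>
      (x0 + sx * pvCount dx d (i : Int), y0 + sy * pvCount dy d (i : Int), z0 + sz * pvCount dz d (i : Int))

-- ===== PRECONDITION & SPEC =====
def Spec_bresenham_3d_py (x0 : Int) (y0 : Int) (z0 : Int) (x1 : Int) (y1 : Int) (z1 : Int) (out : List (Int × Int × Int)) : Prop := out = bresenham_3d_py_alt x0 y0 z0 x1 y1 z1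
instance (x0 : Int) (y0 : Int) (z0 : Int) (x1 : Int) (y1 : Int) (z1 : Int) (out : List (Int × Int × Int)) : Decidable (Spec_bresenham_3d_py x0 y0 z0 x1 y1 z1 out) := by unfold Spec_bresenham_3d_py; infer_instance

-- ===== CLAIM (what is proved, stated in full; the proofs are below) =====
def Claim_equal_bresenham_3d_py : Prop := ∀ (x0 : Int) (y0 : Int) (z0 : Int) (x1 : Int) (y1 : Int) (z1 : Int), Dom_bresenham_3d_py x0 y0 z0 x1 y1 z1 → Spec_bresenham_3d_py x0 y0 z0 x1 y1 z1 (bresenham_3d_py x0 y0 z0 x1 y1 z1)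

-- ===== LEMMAS AND PROOFS =====

-- A's error accumulator for a secondary axis, in closed form at step i.
def pvErr (dd d i : Int) : Int := 2 * dd * (i + 1) - d - 2 * d * pvCount dd d i

lemma pvCount_zero (dd d : Int) (hd : 0 < d) : pvCount dd d 0 = 0 := by
  unfold pvCount
  rw [PySem.Int.floordiv_eq_iff_of_pos (by omega)]
  constructor <;> nlinarith

lemma pvCount_self (d : Int) (hd : 0 < d) (i : Int) : pvCount d d i = i := by
  unfold pvCount
  rw [PySem.Int.floordiv_eq_iff_of_pos (by omega)]
  constructor <;> nlinarith

lemma pvErr_zero (dd d : Int) (hd : 0 < d) : pvErr dd d 0 = 2 * dd - d := by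
  unfold pvErr; rw [pvCount_zero dd d hd]; ring

lemma pvCount_step (dd d i : Int) (hd : 0 < d) (h0 : 0 ≤ dd) (h1 : dd ≤ d) :
    pvCount dd d (i + 1) = pvCount dd d i + (if pvErr dd d i > 0 then 1 else 0) := by
  have hq : pvCount dd d i * (2 * d) ≤ 2 * dd * i + d - 1 ∧
      2 * dd * i + d - 1 < (pvCount dd d i + 1) * (2 * d) :=
    (PySem.Int.floordiv_eq_iff_of_pos (by omega)).mp rfl
  have hq' : pvCount dd d (i + 1) * (2 * d) ≤ 2 * dd * (i + 1) + d - 1 ∧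
      2 * dd * (i + 1) + d - 1 < (pvCount dd d (i + 1) + 1) * (2 * d) :=
    (PySem.Int.floordiv_eq_iff_of_pos (by omega)).mp rfl
  set q := pvCount dd d i with hqdef
  set q' := pvCount dd d (i + 1) with hq'def
  have hle : q ≤ q' := by nlinarith [hq.1, hq'.2]
  have hge : q' ≤ q + 1 := by nlinarith [hq'.1, hq.2]
  unfold pvErr
  rw [← hqdef]
  split_ifs with hE
  · -- err > 0 forces an increment
    have : q + 1 ≤ q' := by nlinarith [hq'.2]
    omega
  · have : q' ≤ q := by nlinarith [hq'.1]
    omega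

lemma pvErr_step_pos (dd d i : Int) (hd : 0 < d) (h0 : 0 ≤ dd) (h1 : dd ≤ d)
    (hE : pvErr dd d i > 0) :
    pvErr dd d i - 2 * d + 2 * dd = pvErr dd d (i + 1) := by
  have h := pvCount_step dd d i hd h0 h1
  rw [if_pos hE] at h
  unfold pvErr at *
  rw [h]; ring

lemma pvErr_step_neg (dd d i : Int) (hd : 0 < d) (h0 : 0 ≤ dd) (h1 : dd ≤ d)
    (hE : ¬ pvErr dd d i > 0) :
    pvErr dd d i + 2 * dd = pvErr dd d (i + 1) := by
  have h := pvCount_step dd d i hd h0 h1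
  rw [if_neg hE] at h
  unfold pvErr at *
  rw [h]; ring

-- Generic form of A's three loops: drive u, accumulate errors for v and w,
-- emit g u v w (g is the coordinate permutation of the branch).
def pvGen (g : Int → Int → Int → Int × Int × Int) (su s1 s2 d d1 d2 : Int) :
    Nat → Int → Int → Int → Int → Int → List (Int × Int × Int)
  | 0, _, _, _, _, _ => []
  | n + 1, u, v, w, e1, e2 =>
    g u v w ::
      pvGen g su s1 s2 d d1 d2 n (u + su)
        (if e1 > 0 then v + s1 else v)
        (if e2 > 0 then w + s2 else w)
        ((if e1 > 0 then e1 - 2 * d else e1) + 2 * d1)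
        ((if e2 > 0 then e2 - 2 * d else e2) + 2 * d2)

lemma pvLoopX_eq_gen (sx sy sz dx dy dz : Int) (n : Nat) (x y z e1 e2 : Int) :
    pvLoopX sx sy sz dx dy dz n x y z e1 e2 =
      pvGen (fun u v w => (u, v, w)) sx sy sz dx dy dz n x y z e1 e2 := by
  induction n generalizing x y z e1 e2 with
  | zero => rfl
  | succ n ih => simp only [pvLoopX, pvGen, ih]

lemma pvLoopY_eq_gen (sx sy sz dx dy dz : Int) (n : Nat) (x y z e1 e2 : Int) :
    pvLoopY sx sy sz dx dy dz n x y z e1 e2 =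
      pvGen (fun u v w => (v, u, w)) sy sx sz dy dx dz n y x z e1 e2 := by
  induction n generalizing x y z e1 e2 with
  | zero => rfl
  | succ n ih => simp only [pvLoopY, pvGen, ih]

lemma pvLoopZ_eq_gen (sx sy sz dx dy dz : Int) (n : Nat) (x y z e1 e2 : Int) :
    pvLoopZ sx sy sz dx dy dz n x y z e1 e2 =
      pvGen (fun u v w => (v, w, u)) sz sx sy dz dx dy n z x y e1 e2 := by
  induction n generalizing x y z e1 e2 with
  | zero => rfl
  | succ n ih => simp only [pvLoopZ, pvGen, ih]

-- Loop invariant: from the closed-form state at step i, pvGen emits exactly the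
-- closed-form points for steps i, i+1, …, i+n-1.
lemma pvGen_eq (g : Int → Int → Int → Int × Int × Int) (su s1 s2 d d1 d2 : Int)
    (hd : 0 < d) (h10 : 0 ≤ d1) (h1d : d1 ≤ d) (h20 : 0 ≤ d2) (h2d : d2 ≤ d)
    (u0 v0 w0 : Int) (n : Nat) : ∀ i : Nat,
    pvGen g su s1 s2 d d1 d2 n (u0 + su * i)
        (v0 + s1 * pvCount d1 d i) (w0 + s2 * pvCount d2 d i)
        (pvErr d1 d i) (pvErr d2 d i)
      = (List.range' i n).map
          (fun j : Nat => g (u0 + su * (j : Int)) (v0 + s1 * pvCount d1 d (j : Int)) (w0 + s2 * pvCount d2 d (j : Int))) := by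
  induction n with
  | zero => intro i; rfl
  | succ n ih =>
    intro i
    rw [List.range'_succ, List.map_cons]
    simp only [pvGen]
    congr 1
    have hu : u0 + su * (i : Int) + su = u0 + su * ((i + 1 : Nat) : Int) := by push_cast; ring
    have hv : (if pvErr d1 d i > 0 then v0 + s1 * pvCount d1 d i + s1 else v0 + s1 * pvCount d1 d i)
        = v0 + s1 * pvCount d1 d ((i + 1 : Nat) : Int) := by
      have h := pvCount_step d1 d (i:Int) hd h10 h1d
      push_cast
      split_ifs with hE
      · rw [h, if_pos hE]; ring
      · rw [h, if_neg hE]; ring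
    have hw : (if pvErr d2 d i > 0 then w0 + s2 * pvCount d2 d i + s2 else w0 + s2 * pvCount d2 d i)
        = w0 + s2 * pvCount d2 d ((i + 1 : Nat) : Int) := by
      have h := pvCount_step d2 d (i:Int) hd h20 h2d
      push_cast
      split_ifs with hE
      · rw [h, if_pos hE]; ring
      · rw [h, if_neg hE]; ring
    have he1 : (if pvErr d1 d i > 0 then pvErr d1 d i - 2 * d else pvErr d1 d i) + 2 * d1
        = pvErr d1 d ((i + 1 : Nat) : Int) := by
      push_cast
      split_ifs with hE
      · exact pvErr_step_pos d1 d (i:Int) hd h10 h1d hE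
      · exact pvErr_step_neg d1 d (i:Int) hd h10 h1d hE
    have he2 : (if pvErr d2 d i > 0 then pvErr d2 d i - 2 * d else pvErr d2 d i) + 2 * d2
        = pvErr d2 d ((i + 1 : Nat) : Int) := by
      push_cast
      split_ifs with hE
      · exact pvErr_step_pos d2 d (i:Int) hd h20 h2d hE
      · exact pvErr_step_neg d2 d (i:Int) hd h20 h2d hE
    rw [hu, hv, hw, he1, he2]
    exact ih (i + 1)

-- Specialisation to the loop's actual start state (i = 0).
lemma pvGen_eq0 (g : Int → Int → Int → Int × Int × Int) (su s1 s2 d d1 d2 : Int)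
    (hd : 0 < d) (h10 : 0 ≤ d1) (h1d : d1 ≤ d) (h20 : 0 ≤ d2) (h2d : d2 ≤ d)
    (u0 v0 w0 : Int) (n : Nat) :
    pvGen g su s1 s2 d d1 d2 n u0 v0 w0 (2 * d1 - d) (2 * d2 - d)
      = (List.range n).map
          (fun j : Nat => g (u0 + su * (j : Int)) (v0 + s1 * pvCount d1 d (j : Int)) (w0 + s2 * pvCount d2 d (j : Int))) := by
  have h := pvGen_eq g su s1 s2 d d1 d2 hd h10 h1d h20 h2d u0 v0 w0 n 0
  simp only [Nat.cast_zero, mul_zero, add_zero, pvCount_zero _ _ hd, pvErr_zero _ _ hd] at h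
  rw [List.range_eq_range']
  exact h

theorem bresenham_eq (x0 y0 z0 x1 y1 z1 : Int) :
    bresenham_3d_py x0 y0 z0 x1 y1 z1 = bresenham_3d_py_alt x0 y0 z0 x1 y1 z1 := by
  unfold bresenham_3d_py bresenham_3d_py_alt
  set dx := |x1 - x0| with hdx
  set dy := |y1 - y0| with hdy
  set dz := |z1 - z0| with hdz
  have hx0 : 0 ≤ dx := abs_nonneg _
  have hy0 : 0 ≤ dy := abs_nonneg _
  have hz0 : 0 ≤ dz := abs_nonneg _
  set sx : Int := if x1 > x0 then 1 else -1
  set sy : Int := if y1 > y0 then 1 else -1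
  set sz : Int := if z1 > z0 then 1 else -1
  by_cases h0 : max dx (max dy dz) = 0
  · have e1 : dx = 0 := by omega
    have e2 : dy = 0 := by omega
    have e3 : dz = 0 := by omega
    simp [e1, e2, e3, pvLoopX]
  · have hd : 0 < max dx (max dy dz) := by omega
    rw [if_neg h0]
    by_cases hX : dx ≥ dy ∧ dx ≥ dz
    · have hm : max dx (max dy dz) = dx := by omega
      rw [if_pos hX, hm, pvLoopX_eq_gen,
        pvGen_eq0 _ sx sy sz dx dy dz (by omega) hy0 hX.1 hz0 hX.2]
      refine List.map_congr_left fun j hj => ?_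
      rw [pvCount_self dx (by omega) j]
    · rw [if_neg hX]
      by_cases hY : dy ≥ dx ∧ dy ≥ dz
      · have hm : max dx (max dy dz) = dy := by omega
        rw [if_pos hY, hm, pvLoopY_eq_gen,
          pvGen_eq0 _ sy sx sz dy dx dz (by omega) hx0 hY.1 hz0 hY.2]
        refine List.map_congr_left fun j hj => ?_
        rw [pvCount_self dy (by omega) j]
      · have hzx : dz ≥ dx := by omega
        have hzy : dz ≥ dy := by omega
        have hm : max dx (max dy dz) = dz := by omega
        rw [if_neg hY, hm, pvLoopZ_eq_gen,
          pvGen_eq0 _ sz sx sy dz dx dy (by omega) hx0 hzx hy0 hzy]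
        refine List.map_congr_left fun j hj => ?_
        rw [pvCount_self dz (by omega) j]

-- ===== VERDICT (by name: the statement is the Claim_ definition above) =====
theorem bresenham_3d_py_spec : Claim_equal_bresenham_3d_py := by
  intro x0 y0 z0 x1 y1 z1 _
  exact bresenham_eq x0 y0 z0 x1 y1 z1
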